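-- pv_equiv track=rewrite | github.com/IBM/raven-large-language-models | src/datasets/rpm_dataset.py | _context
-- ===== SOURCE A (Python) =====
-- def _context(arr, n, nshow):
--     tpl = ""
--     for row in range(nshow):
--         tpl = tpl + "row " + str(row + 1) + ": {}"
--         if row < nshow - 1:
--             for _ in range(1, n):
--                 tpl += ", {}"
--             tpl += "; "
--         else:
--             for _ in range(1, n - 1):
--                 tpl += ", {}"
--             tpl += ", "
--
--     return tpl.format(*arr[((n - nshow) * n) : (n**2 - 1)])
-- ===== SOURCE B (Python) =====
-- def _context(arr, n, nshow):
--     # Emit the output directly in one pass instead of building a format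
--     # template first: pull values off an iterator, writing each row as its
--     # label and first value, then the row's remaining values, then the
--     # row terminator.
--     vals = iter(arr[(n - nshow) * n : n * n - 1])
--     parts = []
--     for row in range(nshow):
--         parts.append("row {}: {}".format(row + 1, next(vals)))
--         extra = n - 1 if row < nshow - 1 else n - 2
--         for _ in range(extra):
--             parts.append(", {}".format(next(vals)))
--         parts.append("; " if row < nshow - 1 else ", ")
--     return "".join(parts)
-- ===== Notes on version B (the rewrite author's own statement) =====
-- stated objective: simpler
-- what changed: B drops A's two-phase template-build-then-str.format approach and emits the output directly in one pass, pulling values off an iterator: each row is its label plus first value, the row's remaining values, and the terminator; Pre_ excludes only inputs with fewer sliced values than needed, where A raises IndexError (and B StopIteration).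
import Mathlib
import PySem

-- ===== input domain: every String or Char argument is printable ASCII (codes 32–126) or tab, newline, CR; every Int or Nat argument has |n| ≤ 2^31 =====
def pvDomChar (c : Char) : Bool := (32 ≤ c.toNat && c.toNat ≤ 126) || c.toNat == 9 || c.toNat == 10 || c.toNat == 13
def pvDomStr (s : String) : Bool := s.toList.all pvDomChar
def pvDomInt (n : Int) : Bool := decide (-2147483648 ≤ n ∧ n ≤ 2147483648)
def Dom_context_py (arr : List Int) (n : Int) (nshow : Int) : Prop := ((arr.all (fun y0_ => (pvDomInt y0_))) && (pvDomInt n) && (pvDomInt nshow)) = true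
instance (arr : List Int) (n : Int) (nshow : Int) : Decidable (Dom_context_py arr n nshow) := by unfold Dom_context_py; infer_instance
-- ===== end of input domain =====

-- B emits each row's text directly from an iterator of the values instead of A's two-phase
-- template-then-format; equivalence is about the return value (neither mutates arr).

-- ===== PORT A =====
-- tpl.format(*args): scan the template, each "{}" consumes the next argument (str(arg)),
-- other characters are copied; none = IndexError (too few arguments). Exact for the
-- templates A builds (their only braces occur as "{}" pairs).
def fmtA : List Char → List Int → Option (List Char)
  | [], _ => some []
  | [c], _ => some [c]
  | c :: d :: rest, as =>
    if c = '{' ∧ d = '}' then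
      match as with
      | a :: as' => (fmtA rest as').map (fun r => PySem.Int.toChars a ++ r)
      | [] => none
    else (fmtA (d :: rest) as).map (c :: ·)

-- the body of A's 'for row in range(nshow)' loop
def stepA (n nshow : Int) (tpl : List Char) (row : Int) : List Char :=
  let tpl := tpl ++ "row ".toList ++ PySem.Int.toChars (row + 1) ++ ": {}".toList
  if row < nshow - 1 then
    ((PySem.List.pyRange 1 n 1).foldl (fun t _ => t ++ ", {}".toList) tpl) ++ "; ".toList
  else
    ((PySem.List.pyRange 1 (n - 1) 1).foldl (fun t _ => t ++ ", {}".toList) tpl) ++ ", ".toList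

def context_py (arr : List Int) (n : Int) (nshow : Int) : String :=
  let tpl : List Char := (PySem.List.pyRange 0 nshow 1).foldl (stepA n nshow) []
  String.ofList ((fmtA tpl (PySem.List.slice arr (some ((n - nshow) * n)) (some (n * n - 1)))).getD [])

-- ===== PORT B =====
-- next(vals) inside the inner 'for _ in range(extra)' loop: consume one value, emit ", v"
def nextB (s : List Char × List Int) (_ : Int) : Option (List Char × List Int) :=
  match s.2 with
  | [] => none
  | w :: r => some (s.1 ++ ", ".toList ++ PySem.Int.toChars w, r)

-- the body of B's 'for row in range(nshow)' loop; state = (output chars, remaining values);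
-- none = StopIteration (values exhausted)
def rowB (n nshow : Int) (st : List Char × List Int) (row : Int) : Option (List Char × List Int) :=
  match st.2 with
  | [] => none
  | v :: rest =>
    let extra : Int := if row < nshow - 1 then n - 1 else n - 2
    ((PySem.List.pyRange 0 extra 1).foldlM nextB
        (st.1 ++ "row ".toList ++ PySem.Int.toChars (row + 1) ++ ": ".toList ++ PySem.Int.toChars v, rest)).map
      (fun s => (s.1 ++ (if row < nshow - 1 then "; ".toList else ", ".toList), s.2))

def context_py_alt (arr : List Int) (n : Int) (nshow : Int) : String :=
  let vals := PySem.List.slice arr (some ((n - nshow) * n)) (some (n * n - 1))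
  String.ofList ((((PySem.List.pyRange 0 nshow 1).foldlM (rowB n nshow) (([] : List Char), vals)).map (·.1)).getD [])

-- ===== PRECONDITION & SPEC =====
-- Pre_ excludes exactly the inputs on which both programs raise (A: IndexError from
-- str.format; B: StopIteration): fewer sliced values than the rows need, namely
-- max(n,1) per row and max(n-1,1) for the last.
def Pre_context_py (arr : List Int) (n : Int) (nshow : Int) : Prop :=
  (if nshow ≤ 0 then 0 else (nshow - 1) * max n 1 + max (n - 1) 1)
    ≤ (PySem.List.slice arr (some ((n - nshow) * n)) (some (n * n - 1))).length
instance (arr : List Int) (n : Int) (nshow : Int) : Decidable (Pre_context_py arr n nshow) := by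
  unfold Pre_context_py; infer_instance

def pvWitness_context_py : List Int × Int × Int := ([1, 2, 3, 4, 5, 6, 7, 8, 9], 3, 3)

def Spec_context_py (arr : List Int) (n : Int) (nshow : Int) (out : String) : Prop := out = context_py_alt arr n nshow
instance (arr : List Int) (n : Int) (nshow : Int) (out : String) : Decidable (Spec_context_py arr n nshow out) := by unfold Spec_context_py; infer_instance

-- ===== CLAIM (what is proved, stated in full; the proofs are below) =====
def Claim_equal_context_py : Prop := ∀ (arr : List Int) (n : Int) (nshow : Int), Dom_context_py arr n nshow → Pre_context_py arr n nshow → Spec_context_py arr n nshow (context_py arr n nshow)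

-- ===== LEMMAS AND PROOFS =====

-- row counts: every row but the last consumes max(n,1) values, the last max(n-1,1)
-- (under Pre_ these are n and n-1; the max form also covers the A-side template counts)
def cntN (n : Int) : Nat := (max n 1).toNat
def cntL (n : Int) : Nat := (max (n - 1) 1).toNat

-- q copies of ", {}"
def phs (q : Nat) : List Char := (List.replicate q ", {}".toList).flatten

def nonlastTpl (n : Int) (row : Int) : List Char :=
  "row ".toList ++ PySem.Int.toChars (row + 1) ++ ": {}".toList ++ phs (n - 1).toNat ++ "; ".toList

def rowChunk (k : Int) (vs : List Int) (sep : List Char) : List Char :=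
  "row ".toList ++ PySem.Int.toChars k ++ ": ".toList
    ++ PySem.Chars.join ", ".toList (vs.map PySem.Int.toChars) ++ sep

def body (n : Int) : Int → Nat → List Int → List Char
  | _, 0, _ => []
  | a, m + 1, vals =>
      rowChunk (a + 1) (vals.take (cntN n)) "; ".toList ++ body n (a + 1) m (vals.drop (cntN n))

theorem phs_succ (q : Nat) : phs (q + 1) = ", {}".toList ++ phs q := by
  simp [phs, List.replicate_succ]

theorem flatMap_const {α : Type} (l : List α) (c : List Char) :
    l.flatMap (fun _ => c) = (List.replicate l.length c).flatten := by
  induction l with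
  | nil => simp
  | cons x t ih => simp [List.replicate_succ, ih]

theorem fmt_cons (c : Char) (t : List Char) (as : List Int) (h : c ≠ '{') :
    fmtA (c :: t) as = (fmtA t as).map (c :: ·) := by
  cases t with
  | nil => simp [fmtA]
  | cons d t' => simp [fmtA, h]

theorem fmt_lit (cs : List Char) (rest : List Char) (as : List Int) (h : '{' ∉ cs) :
    fmtA (cs ++ rest) as = (fmtA rest as).map (cs ++ ·) := by
  induction cs with
  | nil => simp
  | cons c t ih =>
      have hc : c ≠ '{' := by intro hh; exact h (hh ▸ List.mem_cons_self)
      have ht : '{' ∉ t := fun hh => h (List.mem_cons_of_mem _ hh)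
      simp only [List.cons_append, fmt_cons c _ _ hc, ih ht, Option.map_map]
      rfl

theorem fmt_ph (rest : List Char) (a : Int) (as : List Int) :
    fmtA ('{' :: '}' :: rest) (a :: as) = (fmtA rest as).map (PySem.Int.toChars a ++ ·) := by
  rw [fmtA]; simp

theorem digitChar_ne (m : Nat) : Nat.digitChar m ≠ '{' := by
  rcases Nat.lt_or_ge m 16 with h | h
  · interval_cases m <;> decide
  · have h0 : ¬ (m = 0) := by omega
    have h1 : ¬ (m = 1) := by omega
    have h2 : ¬ (m = 2) := by omega
    have h3 : ¬ (m = 3) := by omega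
    have h4 : ¬ (m = 4) := by omega
    have h5 : ¬ (m = 5) := by omega
    have h6 : ¬ (m = 6) := by omega
    have h7 : ¬ (m = 7) := by omega
    have h8 : ¬ (m = 8) := by omega
    have h9 : ¬ (m = 9) := by omega
    have h10 : ¬ (m = 10) := by omega
    have h11 : ¬ (m = 11) := by omega
    have h12 : ¬ (m = 12) := by omega
    have h13 : ¬ (m = 13) := by omega
    have h14 : ¬ (m = 14) := by omega
    have h15 : ¬ (m = 15) := by omega
    simp only [Nat.digitChar, if_neg h0, if_neg h1, if_neg h2, if_neg h3, if_neg h4, if_neg h5,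
      if_neg h6, if_neg h7, if_neg h8, if_neg h9, if_neg h10, if_neg h11, if_neg h12,
      if_neg h13, if_neg h14, if_neg h15]
    decide

theorem toDigitsCore_mem (b : Nat) : ∀ (f n : Nat) (l : List Char) (c : Char),
    c ∈ Nat.toDigitsCore b f n l → c ∈ l ∨ ∃ m, c = Nat.digitChar m := by
  intro f
  induction f with
  | zero => intro n l c h; exact Or.inl h
  | succ f ih =>
      intro n l c h
      rw [Nat.toDigitsCore] at h
      split at h
      next =>
        rcases List.mem_cons.mp h with h1 | h1
        · exact Or.inr ⟨n % b, h1⟩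
        · exact Or.inl h1
      next =>
        rcases ih _ _ _ h with h1 | h1
        · rcases List.mem_cons.mp h1 with h2 | h2
          · exact Or.inr ⟨n % b, h2⟩
          · exact Or.inl h2
        · exact Or.inr h1

theorem toChars_no_brace (k : Int) : '{' ∉ PySem.Int.toChars k := by
  intro h
  unfold PySem.Int.toChars at h
  split_ifs at h with hk
  · rcases List.mem_cons.mp h with h1 | h1
    · exact absurd h1 (by decide)
    · rcases toDigitsCore_mem 10 _ _ _ _ h1 with h2 | ⟨m, hm⟩
      · exact absurd h2 List.not_mem_nil
      · exact digitChar_ne m hm.symm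
  · rcases toDigitsCore_mem 10 _ _ _ _ h with h2 | ⟨m, hm⟩
    · exact absurd h2 List.not_mem_nil
    · exact digitChar_ne m hm.symm

theorem join_eq_flat (v : Int) (vs : List Int) :
    PySem.Chars.join [',', ' '] (PySem.Int.toChars v :: vs.map PySem.Int.toChars)
      = PySem.Int.toChars v ++ vs.flatMap (fun w => ',' :: ' ' :: PySem.Int.toChars w) := by
  induction vs generalizing v with
  | nil => simpa using PySem.Chars.join_singleton [',', ' '] (PySem.Int.toChars v)
  | cons w t ih =>
      simp only [List.map_cons] at ih ⊢
      rw [show PySem.Chars.join [',', ' '] (PySem.Int.toChars v :: PySem.Int.toChars w :: t.map PySem.Int.toChars)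
            = PySem.Int.toChars v ++ [',', ' '] ++ PySem.Chars.join [',', ' '] (PySem.Int.toChars w :: t.map PySem.Int.toChars)
          from PySem.Chars.join_cons_cons _ _ _ _, ih w]
      simp

theorem fmt_phs : ∀ (vs : List Int) (rest : List Char) (as : List Int),
    fmtA (phs vs.length ++ rest) (vs ++ as)
      = (fmtA rest as).map (fun r => vs.flatMap (fun v => ',' :: ' ' :: PySem.Int.toChars v) ++ r) := by
  intro vs
  induction vs with
  | nil => simp [phs]
  | cons v t ih =>
      intro rest as
      rw [List.length_cons, phs_succ]
      have h2 : ", {}".toList = ", ".toList ++ '{' :: '}' :: ([] : List Char) := by decide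
      rw [h2]
      simp only [List.append_assoc, List.cons_append, List.nil_append]
      rw [fmt_lit ", ".toList _ _ (by decide), fmt_ph, ih]
      simp only [Option.map_map]
      congr 1
      funext r
      simp

theorem fmt_row (k : Int) (q : Nat) (vs : List Int) (sep rest : List Char) (as : List Int)
    (hlen : vs.length = q + 1) (hsep : '{' ∉ sep) :
    fmtA ("row ".toList ++ (PySem.Int.toChars k ++ (": {}".toList ++ (phs q ++ (sep ++ rest))))) (vs ++ as)
      = (fmtA rest as).map (fun r => rowChunk k vs sep ++ r) := by
  cases vs with
  | nil => simp at hlen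
  | cons v t =>
      have hq : t.length = q := by simpa using hlen
      have hpre : '{' ∉ ("row ".toList ++ PySem.Int.toChars k ++ ": ".toList) := by
        simp [toChars_no_brace k]
      have h2 : ": {}".toList = ": ".toList ++ '{' :: '}' :: ([] : List Char) := by decide
      rw [h2]
      have hpre' := fmt_lit ("row ".toList ++ PySem.Int.toChars k ++ ": ".toList)
        ('{' :: '}' :: (phs q ++ (sep ++ rest))) ((v :: t) ++ as) hpre
      simp only [List.append_assoc, List.cons_append, List.nil_append] at hpre' ⊢
      rw [hpre', fmt_ph, ← hq, fmt_phs, fmt_lit sep rest as hsep]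
      simp only [Option.map_map]
      congr 1
      funext r
      simp only [Function.comp, rowChunk, List.map_cons,
        show (", ".toList : List Char) = [',', ' '] from rfl]
      rw [join_eq_flat]
      simp

theorem A_rows (n : Int) : ∀ (m : Nat) (a : Int) (vals : List Int) (rest : List Char),
    m * cntN n ≤ vals.length →
    fmtA ((PySem.List.pyRange a (a + m) 1).flatMap (nonlastTpl n) ++ rest) vals
      = (fmtA rest (vals.drop (m * cntN n))).map (fun r => body n a m vals ++ r) := by
  intro m
  induction m with
  | zero =>
      intro a vals rest _
      simp [body]
  | succ m ih =>
      intro a vals rest hlen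
      rw [Nat.add_mul, Nat.one_mul] at hlen
      have harg : a + ((m + 1 : Nat) : Int) = (a + 1) + (m : Nat) := by push_cast; ring
      have hcons : PySem.List.pyRange a (a + (m + 1 : Nat)) 1
          = a :: PySem.List.pyRange (a + 1) ((a + 1) + m) 1 := by
        rw [harg, PySem.List.pyRange_one_cons (by push_cast; omega)]
      have hcle : cntN n ≤ vals.length := by omega
      have hq : (vals.take (cntN n)).length = (n - 1).toNat + 1 := by
        rw [List.length_take]
        unfold cntN at hcle ⊢
        omega
      rw [hcons]
      simp only [List.flatMap_cons, List.append_assoc]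
      have hsplit : vals = vals.take (cntN n) ++ vals.drop (cntN n) := (List.take_append_drop _ _).symm
      have hrow := fmt_row (a + 1) (n - 1).toNat (vals.take (cntN n)) "; ".toList
        ((PySem.List.pyRange (a + 1) ((a + 1) + m) 1).flatMap (nonlastTpl n) ++ rest)
        (vals.drop (cntN n)) hq (by decide)
      rw [show "row ".toList ++ (PySem.Int.toChars (a + 1) ++ (": {}".toList ++ (phs (n - 1).toNat
            ++ ("; ".toList ++ ((PySem.List.pyRange (a + 1) ((a + 1) + m) 1).flatMap (nonlastTpl n) ++ rest)))))
          = nonlastTpl n a ++ ((PySem.List.pyRange (a + 1) ((a + 1) + m) 1).flatMap (nonlastTpl n) ++ rest)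
          from by simp [nonlastTpl]] at hrow
      conv_lhs => rw [hsplit]
      rw [hrow, ih (a + 1) (vals.drop (cntN n)) rest (by rw [List.length_drop]; omega)]
      simp only [Option.map_map, List.drop_drop]
      rw [show (m + 1) * cntN n = cntN n + m * cntN n from by rw [Nat.add_mul, Nat.one_mul]; omega]
      congr 1
      funext r
      simp [body, Function.comp]

theorem max_toNat_cast (n : Int) : max n 1 = ((cntN n : Nat) : Int) := by unfold cntN; omega

theorem maxL_toNat_cast (n : Int) : max (n - 1) 1 = ((cntL n : Nat) : Int) := by unfold cntL; omega

theorem cntN_eq (n : Int) : cntN n = (n - 1).toNat + 1 := by unfold cntN; omega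

theorem cntL_eq (n : Int) : cntL n = (n - 2).toNat + 1 := by unfold cntL; omega

-- the inner loop of B: consumes one value per iteration, emitting ", v"
theorem innerB : ∀ (l : List Int) (out : List Char) (vs : List Int), l.length ≤ vs.length →
    l.foldlM nextB (out, vs)
      = some (out ++ (vs.take l.length).flatMap (fun w => ',' :: ' ' :: PySem.Int.toChars w),
              vs.drop l.length) := by
  intro l
  induction l with
  | nil => intro out vs _; simp
  | cons x t ih =>
      intro out vs hlen
      cases vs with
      | nil => simp at hlen
      | cons w r =>
          rw [List.foldlM_cons]
          have hstep : nextB (out, w :: r) x = some (out ++ ", ".toList ++ PySem.Int.toChars w, r) := rfl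
          rw [hstep]
          simp only [Option.bind_eq_bind, Option.bind_some]
          rw [ih _ r (by simpa using hlen)]
          simp [List.append_assoc]

-- a non-last row of B consumes cntN n values and emits rowChunk with "; "
theorem rowB_lt (n nshow : Int) (out : List Char) (vs : List Int) (row : Int)
    (hrow : row < nshow - 1) (hlen : cntN n ≤ vs.length) :
    rowB n nshow (out, vs) row
      = some (out ++ rowChunk (row + 1) (vs.take (cntN n)) "; ".toList, vs.drop (cntN n)) := by
  cases vs with
  | nil => rw [cntN_eq] at hlen; simp at hlen
  | cons v r =>
      unfold rowB
      simp only [if_pos hrow]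
      have hq : (PySem.List.pyRange 0 (n - 1) 1).length = (n - 1).toNat := by
        rw [PySem.List.length_pyRange_one]; omega
      have hle : (PySem.List.pyRange 0 (n - 1) 1).length ≤ r.length := by
        rw [hq]; rw [cntN_eq] at hlen; simpa using hlen
      rw [innerB _ _ r hle, hq]
      simp only [Option.map_some]
      rw [cntN_eq]
      simp only [List.take_succ_cons, List.drop_succ_cons]
      congr 1
      simp only [rowChunk, List.map_cons, show (", ".toList : List Char) = [',', ' '] from rfl]
      rw [join_eq_flat]
      simp

-- the last row of B consumes cntL n values and emits rowChunk with ", "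
theorem rowB_last (n nshow : Int) (out : List Char) (vs : List Int) (row : Int)
    (hrow : ¬ row < nshow - 1) (hlen : cntL n ≤ vs.length) :
    rowB n nshow (out, vs) row
      = some (out ++ rowChunk (row + 1) (vs.take (cntL n)) ", ".toList, vs.drop (cntL n)) := by
  cases vs with
  | nil => rw [cntL_eq] at hlen; simp at hlen
  | cons v r =>
      unfold rowB
      simp only [if_neg hrow]
      have hq : (PySem.List.pyRange 0 (n - 2) 1).length = (n - 2).toNat := by
        rw [PySem.List.length_pyRange_one]; omega
      have hle : (PySem.List.pyRange 0 (n - 2) 1).length ≤ r.length := by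
        rw [hq]; rw [cntL_eq] at hlen; simpa using hlen
      rw [innerB _ _ r hle, hq]
      simp only [Option.map_some]
      rw [cntL_eq]
      simp only [List.take_succ_cons, List.drop_succ_cons]
      congr 1
      simp only [rowChunk, List.map_cons, show (", ".toList : List Char) = [',', ' '] from rfl]
      rw [join_eq_flat]
      simp

theorem B_rows (n nshow : Int) : ∀ (m : Nat) (a : Int) (out : List Char) (vals : List Int),
    a + m ≤ nshow - 1 → m * cntN n ≤ vals.length →
    (PySem.List.pyRange a (a + m) 1).foldlM (rowB n nshow) (out, vals)
      = some (out ++ body n a m vals, vals.drop (m * cntN n)) := by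
  intro m
  induction m with
  | zero => intro a out vals _ _; simp [body]
  | succ m ih =>
      intro a out vals hrows hlen
      rw [Nat.add_mul, Nat.one_mul] at hlen
      have harg : a + ((m + 1 : Nat) : Int) = (a + 1) + (m : Nat) := by push_cast; ring
      have hcons : PySem.List.pyRange a (a + (m + 1 : Nat)) 1
          = a :: PySem.List.pyRange (a + 1) ((a + 1) + m) 1 := by
        rw [harg, PySem.List.pyRange_one_cons (by push_cast; omega)]
      rw [hcons, List.foldlM_cons]
      have ha : a < nshow - 1 := by push_cast at hrows; omega
      rw [rowB_lt n nshow out vals a ha (by omega)]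
      simp only [Option.bind_eq_bind, Option.bind_some]
      rw [ih (a + 1) _ (vals.drop (cntN n)) (by push_cast at hrows ⊢; omega)
        (by rw [List.length_drop]; omega)]
      congr 2
      · rw [show body n a (m + 1) vals
            = rowChunk (a + 1) (vals.take (cntN n)) "; ".toList
                ++ body n (a + 1) m (vals.drop (cntN n)) from rfl]
        simp [List.append_assoc]
      · rw [List.drop_drop]
        congr 1
        rw [Nat.add_mul, Nat.one_mul]
        omega

-- the singleton last-row step of B's outer foldlM, reduced definitionally
theorem lastStep (n nshow : Int) (b : List Char × List Int) :
    (some b >>= fun b' => ([nshow - 1] : List Int).foldlM (rowB n nshow) b')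
      = rowB n nshow b (nshow - 1) >>= fun b' => pure b' := rfl

theorem context_py_spec : Claim_equal_context_py := by
  intro arr n nshow _ hpre
  unfold Spec_context_py context_py context_py_alt
  set vals := PySem.List.slice arr (some ((n - nshow) * n)) (some (n * n - 1)) with hv
  by_cases h0 : nshow ≤ 0
  · rw [PySem.List.pyRange_one_eq_nil h0]
    simp [fmtA]
  · push_neg at h0
    set m : Nat := (nshow - 1).toNat with hm
    have hm' : ((m : Nat) : Int) = nshow - 1 := by omega
    unfold Pre_context_py at hpre
    rw [if_neg (by omega), max_toNat_cast, maxL_toNat_cast, ← hm'] at hpre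
    have hlen : m * cntN n + cntL n ≤ vals.length := by exact_mod_cast hpre
    have hlen1 : m * cntN n ≤ vals.length := by omega
    have hsplit : PySem.List.pyRange 0 nshow 1
        = PySem.List.pyRange 0 (nshow - 1) 1 ++ [nshow - 1] := by
      conv_lhs => rw [show nshow = (nshow - 1) + 1 from by ring]
      rw [PySem.List.pyRange_one_succ_right (by omega)]
    rw [hsplit]
    simp only [List.foldl_append, List.foldl_cons, List.foldl_nil]
    have hApre : (PySem.List.pyRange 0 (nshow - 1) 1).foldl (stepA n nshow) []
        = (PySem.List.pyRange 0 (nshow - 1) 1).flatMap (nonlastTpl n) := by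
      rw [PySem.List.foldl_congr_mem _ (stepA n nshow) (fun tpl row => tpl ++ nonlastTpl n row) []
        (by
          intro acc x hx
          have hxlt : x < nshow - 1 := (PySem.List.mem_pyRange_one.mp hx).2
          unfold stepA
          simp only [if_pos hxlt, PySem.List.foldl_append_eq_flatMap, flatMap_const,
            PySem.List.length_pyRange_one]
          simp [nonlastTpl, phs])]
      rw [PySem.List.foldl_append_eq_flatMap]
      simp
    have hAlast : stepA n nshow ((PySem.List.pyRange 0 (nshow - 1) 1).flatMap (nonlastTpl n)) (nshow - 1)
        = (PySem.List.pyRange 0 (nshow - 1) 1).flatMap (nonlastTpl n)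
          ++ ("row ".toList ++ (PySem.Int.toChars nshow ++ (": {}".toList
              ++ (phs ((n - 1) - 1).toNat ++ (", ".toList ++ ([] : List Char)))))) := by
      unfold stepA
      simp only [if_neg (lt_irrefl (nshow - 1)), PySem.List.foldl_append_eq_flatMap,
        flatMap_const, PySem.List.length_pyRange_one]
      simp [phs, show nshow - 1 + 1 = nshow from by ring]
    rw [hApre, hAlast]
    have hrange : PySem.List.pyRange 0 (nshow - 1) 1 = PySem.List.pyRange 0 (0 + (m : Nat)) 1 := by
      rw [← hm']; norm_num
    rw [hrange]
    rw [A_rows n m 0 vals _ hlen1]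
    have hqL : ((n - 1) - 1).toNat + 1 = cntL n := by unfold cntL; omega
    have hq2 : ((vals.drop (m * cntN n)).take (cntL n)).length = ((n - 1) - 1).toNat + 1 := by
      rw [List.length_take, List.length_drop]
      omega
    have hfin := fmt_row nshow (((n - 1) - 1).toNat) ((vals.drop (m * cntN n)).take (cntL n))
      ", ".toList [] ((vals.drop (m * cntN n)).drop (cntL n)) hq2 (by decide)
    rw [List.take_append_drop] at hfin
    rw [hfin]
    -- B side
    rw [List.foldlM_append]
    rw [B_rows n nshow m 0 [] vals (by push_cast; omega) hlen1]
    have hlast := rowB_last n nshow ([] ++ body n 0 m vals) (vals.drop (m * cntN n)) (nshow - 1)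
      (lt_irrefl _) (by rw [List.length_drop]; omega)
    rw [lastStep n nshow ([] ++ body n 0 m vals, vals.drop (m * cntN n)), hlast]
    simp only [Option.pure_def, Option.bind_eq_bind, Option.bind_some, Option.map_some,
      Option.getD_some, fmtA, List.nil_append]
    congr 1
    simp only [List.append_assoc, List.append_nil]
    rw [show nshow - 1 + 1 = nshow from by ring]
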